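-- pv_equiv track=rewrite | github.com/wesleyd/aoc16 | day21b.py | unscramble
-- ===== SOURCE A (Python) =====
-- def rotate_based_on_position_of(s, c):
--     X = s.index(c)
--     X += 1 + (1 if X >=4 else 0)
--     while X:
--         s = s[-1:] + s[:-1]
--         X -= 1
--     return s
--
-- def unscramble(rules, password):
--     s = list(password)
--     for rule in reversed(rules):
--         match rule.split(' '):
--             case ['swap', 'position', X, 'with', 'position', Y]:
--                 X, Y = int(X), int(Y)
--                 s[X], s[Y] = s[Y], s[X]
--             case ['swap', 'letter', A, 'with', 'letter', B]:
--                 X, Y = s.index(A), s.index(B)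
--                 s[X], s[Y] = s[Y], s[X]
--             case ['rotate', dirn, X, 'step'|'steps']:
--                 assert dirn in ('left', 'right'), dirn
--                 X = int(X) * (-1 if dirn == 'left' else 1)
--                 s = s[X:] + s[:X]
--             case ['reverse', 'positions', X, 'through', Y]:
--                 X, Y = int(X), int(Y)
--                 s = s[:X] + list(reversed(s[X:Y+1])) + s[Y+1:]
--             case ['move', 'position', X, 'to', 'position', Y]:
--                 Y, X = int(X), int(Y)
--                 c = s.pop(X)
--                 s.insert(Y, c)
--             case ['rotate', 'based', 'on', 'position', 'of', 'letter', C]: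
--                 orig = s
--                 while orig != rotate_based_on_position_of(s, C):
--                     s = s[1:] + s[:1]
--             case _:
--                 pass
--     return ''.join(s)
-- ===== SOURCE B (Python) =====
-- # Unscramble AoC day-21 passwords: each rule is undone by a pure per-rule step,
-- # and "rotate based on position of letter" is inverted arithmetically from the
-- # forward rotation formula instead of searching over all candidate rotations.
--
-- def _swap(s, x, y):
--     r = list(s)
--     r[x], r[y] = s[y], s[x]
--     return r
--
-- def _undo(t, s):
--     n = len(s)
--     if len(t) == 6 and t[0] == 'swap' and t[1] == 'position' and t[3] == 'with' and t[4] == 'position':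
--         return _swap(s, int(t[2]), int(t[5]))
--     if len(t) == 6 and t[0] == 'swap' and t[1] == 'letter' and t[3] == 'with' and t[4] == 'letter':
--         return _swap(s, s.index(t[2]), s.index(t[5]))
--     if len(t) == 4 and t[0] == 'rotate' and t[1] in ('left', 'right') and t[3] in ('step', 'steps'):
--         k = int(t[2]) if t[1] == 'right' else -int(t[2])
--         return s[k:] + s[:k]
--     if len(t) == 5 and t[0] == 'reverse' and t[1] == 'positions' and t[3] == 'through':
--         x, y = int(t[2]), int(t[4])
--         return s[:x] + s[x:y + 1][::-1] + s[y + 1:]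
--     if len(t) == 6 and t[0] == 'move' and t[1] == 'position' and t[3] == 'to' and t[4] == 'position':
--         r = list(s)
--         r.insert(int(t[2]), r.pop(int(t[5])))
--         return r
--     if len(t) == 7 and t[:6] == ['rotate', 'based', 'on', 'position', 'of', 'letter']:
--         i = s.index(t[6])
--         for k in range(n):
--             j = (i - k) % n
--             if (j + 1 + (j >= 4) - k) % n == 0:
--                 return s[k:] + s[:k]
--     return s
--
-- def unscramble(rules, password):
--     s = list(password)
--     for rule in reversed(rules):
--         s = _undo(rule.split(' '), s)
--     return ''.join(s)
-- ===== Notes on version B (the rewrite author's own statement) =====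
-- stated objective: alternative
-- what changed: B undoes each rule with a pure per-rule step and inverts 'rotate based on position of letter' by computing the inverse rotation amount directly from the forward rotation formula (an O(n) arithmetic scan with A's smallest-rotation tie-break) instead of A's brute-force search that re-runs the forward scramble, one single-step rotation at a time, for every candidate rotation; …
-- outside the precondition, e.g. on unscramble(['reverse positions 2 through 0'], 'abc'): A returns 'abbc', B returns 'abbc'; on unscramble(['rotate based on position of letter a'], 'aab'): A returns 'aba', B returns 'baa'; on unscramble(['rotate based on position of letter a'], 'ba'): A returns 'ba', B returns 'ba'
import Mathlib
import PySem

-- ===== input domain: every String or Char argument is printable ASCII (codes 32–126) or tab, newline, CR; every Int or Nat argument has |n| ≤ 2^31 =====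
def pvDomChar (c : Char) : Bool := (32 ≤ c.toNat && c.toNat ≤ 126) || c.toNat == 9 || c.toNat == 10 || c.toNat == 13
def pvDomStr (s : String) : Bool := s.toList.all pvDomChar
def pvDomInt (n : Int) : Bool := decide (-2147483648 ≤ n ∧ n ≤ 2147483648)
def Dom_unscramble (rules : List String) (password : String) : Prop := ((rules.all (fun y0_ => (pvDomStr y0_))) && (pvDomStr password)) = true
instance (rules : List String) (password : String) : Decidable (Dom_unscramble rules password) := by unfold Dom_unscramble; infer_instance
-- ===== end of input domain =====

-- B undoes each rule with a pure per-rule step and inverts the "rotate based on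
-- position" rule arithmetically from the forward rotation formula instead of A's
-- brute-force try-every-rotation search (objective: alternative algorithm).

-- ===== PORT A =====

-- s.index(c) where s is a list of 1-char strings and c an arbitrary token string
def pvIndexTok (s : List Char) (c : String) : Option Nat :=
  match c.toList with
  | [ch] => PySem.List.index? s ch
  | _ => none

-- one step of `s = s[-1:] + s[:-1]`
def pvRotR1 (s : List Char) : List Char :=
  PySem.List.slice s (some (-1)) none ++ PySem.List.slice s none (some (-1))

-- `while X: s = s[-1:] + s[:-1]; X -= 1`
def pvRotRN : Nat → List Char → List Char
  | 0, s => s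
  | k+1, s => pvRotRN k (pvRotR1 s)

-- rotate_based_on_position_of(s, c)  (index failure = ValueError, excluded by Pre_)
def pvFwd (s : List Char) (c : String) : List Char :=
  match pvIndexTok s c with
  | none => s
  | some i => pvRotRN (i + 1 + (if 4 ≤ i then 1 else 0)) s

-- `s = s[1:] + s[:1]`
def pvRotL1 (s : List Char) : List Char :=
  PySem.List.slice s (some 1) none ++ PySem.List.slice s none (some 1)

-- `while orig != rotate_based_on_position_of(s, C): s = s[1:] + s[:1]` (fuel-bounded;
-- within Pre_ the loop always succeeds after < len(s) rotations)
def pvSearch (c : String) (orig : List Char) : Nat → List Char → List Char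
  | 0, s => s
  | fuel+1, s => if orig = pvFwd s c then s else pvSearch c orig fuel (pvRotL1 s)

-- the body of A's `for rule in reversed(rules)` loop, acting on the split rule
def pvApply (s : List Char) (tok : List String) : List Char :=
  match tok with
  | ["swap", "position", x, "with", "position", y] =>
    match PySem.Int.ofStr? x, PySem.Int.ofStr? y with
    | some a, some b =>
      match PySem.List.pyGet? s b, PySem.List.pyGet? s a with
      | some vb, some va => PySem.List.pySetD (PySem.List.pySetD s a vb) b va
      | _, _ => s
    | _, _ => s
  | ["swap", "letter", a, "with", "letter", b] =>
    match pvIndexTok s a, pvIndexTok s b with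
    | some i, some j =>
      match PySem.List.pyGet? s (j : Int), PySem.List.pyGet? s (i : Int) with
      | some vj, some vi => PySem.List.pySetD (PySem.List.pySetD s (i : Int) vj) (j : Int) vi
      | _, _ => s
    | _, _ => s
  | ["rotate", d, x, "step"] | ["rotate", d, x, "steps"] =>
    if d = "left" ∨ d = "right" then
      match PySem.Int.ofStr? x with
      | some v =>
        let X := v * (if d = "left" then -1 else 1)
        PySem.List.slice s (some X) none ++ PySem.List.slice s none (some X)
      | none => s
    else s
  | ["reverse", "positions", x, "through", y] =>
    match PySem.Int.ofStr? x, PySem.Int.ofStr? y with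
    | some a, some b =>
      PySem.List.slice s none (some a) ++ (PySem.List.slice s (some a) (some (b+1))).reverse
        ++ PySem.List.slice s (some (b+1)) none
    | _, _ => s
  | ["move", "position", x, "to", "position", y] =>
    match PySem.Int.ofStr? x, PySem.Int.ofStr? y with
    | some xv, some yv =>
      match PySem.List.pop? s yv with
      | some cr => PySem.List.insert cr.2 xv cr.1
      | none => s
    | _, _ => s
  | ["rotate", "based", "on", "position", "of", "letter", c] =>
    pvSearch c s (s.length + 1) s
  | _ => s

def pvStep (s : List Char) (rule : String) : List Char :=
  pvApply s ((PySem.Str.split? rule " ").getD [])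

def unscramble (rules : List String) (password : String) : String :=
  String.ofList (PySem.Chars.join []
    ((rules.reverse.foldl pvStep password.toList).map (fun c => [c])))

-- ===== PORT B =====

-- _swap(s, x, y): r = list(s); r[x], r[y] = s[y], s[x]; return r
def altSwap (s : List Char) (x y : Int) : List Char :=
  match PySem.List.pyGet? s y, PySem.List.pyGet? s x with
  | some vy, some vx => PySem.List.pySetD (PySem.List.pySetD s x vy) y vx
  | _, _ => s

-- s.index(t[k]) in B
def altIndex (s : List Char) (c : String) : Option Nat :=
  match c.toList with
  | [ch] => PySem.List.index? s ch
  | _ => none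

-- j + 1 + (j >= 4)
def altShift (j : Int) : Int := j + 1 + (if 4 ≤ j then 1 else 0)

-- `for k in range(n): j = (i-k)%n; if (j + 1 + (j>=4) - k) % n == 0: return s[k:]+s[:k]`
def altLoop (s : List Char) (i n : Int) : List Int → List Char
  | [] => s
  | k :: ks =>
    let j := PySem.Int.mod (i - k) n
    if PySem.Int.mod (altShift j - k) n = 0 then
      PySem.List.slice s (some k) none ++ PySem.List.slice s none (some k)
    else altLoop s i n ks

-- _undo(t, s)
def altUndo (t : List String) (s : List Char) : List Char :=
  let n := s.length
  if t.length == 6 && PySem.List.pyGetD t 0 "" == "swap" && PySem.List.pyGetD t 1 "" == "position"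
      && PySem.List.pyGetD t 3 "" == "with" && PySem.List.pyGetD t 4 "" == "position" then
    match PySem.Int.ofStr? (PySem.List.pyGetD t 2 ""), PySem.Int.ofStr? (PySem.List.pyGetD t 5 "") with
    | some x, some y => altSwap s x y
    | _, _ => s
  else if t.length == 6 && PySem.List.pyGetD t 0 "" == "swap" && PySem.List.pyGetD t 1 "" == "letter"
      && PySem.List.pyGetD t 3 "" == "with" && PySem.List.pyGetD t 4 "" == "letter" then
    match altIndex s (PySem.List.pyGetD t 2 ""), altIndex s (PySem.List.pyGetD t 5 "") with
    | some i, some j => altSwap s (i : Int) (j : Int)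
    | _, _ => s
  else if t.length == 4 && PySem.List.pyGetD t 0 "" == "rotate"
      && (PySem.List.pyGetD t 1 "" == "left" || PySem.List.pyGetD t 1 "" == "right")
      && (PySem.List.pyGetD t 3 "" == "step" || PySem.List.pyGetD t 3 "" == "steps") then
    match PySem.Int.ofStr? (PySem.List.pyGetD t 2 "") with
    | some v =>
      let k := if PySem.List.pyGetD t 1 "" == "right" then v else -v
      PySem.List.slice s (some k) none ++ PySem.List.slice s none (some k)
    | none => s
  else if t.length == 5 && PySem.List.pyGetD t 0 "" == "reverse" && PySem.List.pyGetD t 1 "" == "positions"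
      && PySem.List.pyGetD t 3 "" == "through" then
    match PySem.Int.ofStr? (PySem.List.pyGetD t 2 ""), PySem.Int.ofStr? (PySem.List.pyGetD t 4 "") with
    | some a, some b =>
      PySem.List.slice s none (some a)
        ++ ((PySem.List.slice? (PySem.List.slice s (some a) (some (b+1))) none none (-1)).getD [])
        ++ PySem.List.slice s (some (b+1)) none
    | _, _ => s
  else if t.length == 6 && PySem.List.pyGetD t 0 "" == "move" && PySem.List.pyGetD t 1 "" == "position"
      && PySem.List.pyGetD t 3 "" == "to" && PySem.List.pyGetD t 4 "" == "position" then
    match PySem.Int.ofStr? (PySem.List.pyGetD t 2 ""), PySem.Int.ofStr? (PySem.List.pyGetD t 5 "") with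
    | some q, some p =>
      match PySem.List.pop? s p with
      | some cr => PySem.List.insert cr.2 q cr.1
      | none => s
    | _, _ => s
  else if t.length == 7
      && PySem.List.slice t none (some 6) == ["rotate", "based", "on", "position", "of", "letter"] then
    match altIndex s (PySem.List.pyGetD t 6 "") with
    | some i => altLoop s (i : Int) (n : Int) (PySem.List.pyRange 0 (n : Int) 1)
    | none => s
  else s

def altStep (s : List Char) (rule : String) : List Char :=
  altUndo ((PySem.Str.split? rule " ").getD []) s

def unscramble_alt (rules : List String) (password : String) : String :=
  String.ofList (PySem.Chars.join []
    ((rules.reverse.foldl altStep password.toList).map (fun c => [c])))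

-- ===== PRECONDITION & SPEC =====

-- Pre_ excludes exactly (a) rules on which A raises (unparsable ints, out-of-range
-- swap/move indices, letters absent from the password, a non-left/right rotate
-- direction) or searches forever ("rotate based" with no valid pre-rotation), and
-- (b) two corner families on which A returns but whose value is an accident of A's
-- implementation: "reverse positions X through Y" with X > Y or out-of-range bounds
-- (A's slice arithmetic then silently duplicates or drops letters, after which the
-- success of later letter-indexed rules has no closed form) and "rotate based"
-- rules over a password with repeated letters or a length whose rotate-index map is
-- not invertible (A's answer then depends on its brute-force search order).
def pvPreRule (chars : List Char) (tok : List String) : Bool :=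
  match tok with
  | ["swap", "position", x, "with", "position", y] =>
    match PySem.Int.ofStr? x, PySem.Int.ofStr? y with
    | some a, some b =>
      decide (-(chars.length : Int) ≤ a) && decide (a < (chars.length : Int))
        && decide (-(chars.length : Int) ≤ b) && decide (b < (chars.length : Int))
    | _, _ => false
  | ["swap", "letter", a, "with", "letter", b] =>
    (match a.toList with | [c] => chars.contains c | _ => false)
      && (match b.toList with | [c] => chars.contains c | _ => false)
  | ["rotate", d, x, "step"] => (d == "left" || d == "right") && (PySem.Int.ofStr? x).isSome
  | ["rotate", d, x, "steps"] => (d == "left" || d == "right") && (PySem.Int.ofStr? x).isSome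
  | ["reverse", "positions", x, "through", y] =>
    match PySem.Int.ofStr? x, PySem.Int.ofStr? y with
    | some a, some b => decide (0 ≤ a) && decide (a ≤ b) && decide (b < (chars.length : Int))
    | _, _ => false
  | ["move", "position", x, "to", "position", y] =>
    (PySem.Int.ofStr? x).isSome
      && (match PySem.Int.ofStr? y with
          | some yv => decide (-(chars.length : Int) ≤ yv) && decide (yv < (chars.length : Int))
          | none => false)
  | ["rotate", "based", "on", "position", "of", "letter", c] =>
    (match c.toList with | [ch] => chars.contains ch | _ => false)
      && decide chars.Nodup
      && ((List.range chars.length).all fun i => (List.range chars.length).any fun j =>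
            (j + (j + 1 + (if 4 ≤ j then 1 else 0))) % chars.length == i)
  | _ => true

def Pre_unscramble (rules : List String) (password : String) : Prop :=
  ∀ rule ∈ rules, pvPreRule password.toList ((PySem.Str.split? rule " ").getD []) = true

instance (rules : List String) (password : String) : Decidable (Pre_unscramble rules password) := by
  unfold Pre_unscramble; infer_instance

def pvWitness_unscramble : List String × String :=
  (["rotate based on position of letter h", "swap position 2 with position 7",
    "reverse positions 1 through 5", "move position 3 to position 6",
    "swap letter a with letter c", "rotate left 3 steps"], "abcdefgh")

def Spec_unscramble (rules : List String) (password : String) (out : String) : Prop :=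
  out = unscramble_alt rules password
instance (rules : List String) (password : String) (out : String) : Decidable (Spec_unscramble rules password out) := by
  unfold Spec_unscramble; infer_instance

-- ===== CLAIM (what is proved, stated in full; the proofs are below) =====
def Claim_equal_unscramble : Prop := ∀ (rules : List String) (password : String), Dom_unscramble rules password → Pre_unscramble rules password → Spec_unscramble rules password (unscramble rules password)

-- ===== LEMMAS AND PROOFS =====

theorem pyIdx_norm (n : ℕ) (i : Int) (h1 : -(n : Int) ≤ i) (h2 : i < n) :
    PySem.List.pyIdx? n i = some (PySem.Int.mod i n).toNat := by
  unfold PySem.List.pyIdx? PySem.Int.mod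
  have hn : 0 < (n : Int) := by omega
  have hf : i.fmod (n : Int) = i % (n : Int) := by
    rw [Int.fmod_eq_emod]; simp [le_of_lt hn]
  rcases le_or_gt 0 i with h | h
  · rw [if_pos h, if_pos h2, hf, Int.emod_eq_of_lt h h2]
  · rw [if_neg (by omega), if_pos h1, hf]
    have : i % (n : Int) = (i + n) % n := by rw [Int.add_emod_right]
    rw [this, Int.emod_eq_of_lt (by omega) (by omega)]
    congr 1; omega

theorem mod_idx_lt (n : ℕ) (i : Int) (h1 : -(n : Int) ≤ i) (h2 : i < n) :
    (PySem.Int.mod i n).toNat < n := by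
  have hn : 0 < (n : Int) := by omega
  have := PySem.Int.mod_lt i (b := (n : Int)) hn
  have := PySem.Int.mod_nonneg i (b := (n : Int)) hn
  omega

theorem pyGet_norm (s : List Char) (i : Int) (h1 : -(s.length : Int) ≤ i) (h2 : i < s.length) :
    PySem.List.pyGet? s i = some (s[(PySem.Int.mod i s.length).toNat]'(mod_idx_lt _ _ h1 h2)) := by
  unfold PySem.List.pyGet?
  rw [pyIdx_norm _ _ h1 h2]
  simp [Option.bind, List.getElem?_eq_getElem (mod_idx_lt _ _ h1 h2)]

theorem pySetD_norm (s : List Char) (i : Int) (v : Char)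
    (h1 : -(s.length : Int) ≤ i) (h2 : i < s.length) :
    PySem.List.pySetD s i v = s.set (PySem.Int.mod i s.length).toNat v := by
  unfold PySem.List.pySetD PySem.List.pySet?
  rw [pyIdx_norm _ _ h1 h2]
  rfl

theorem pop_norm (s : List Char) (i : Int) (h1 : -(s.length : Int) ≤ i) (h2 : i < s.length) :
    PySem.List.pop? s i = some ((s[(PySem.Int.mod i s.length).toNat]'(mod_idx_lt _ _ h1 h2)),
      s.eraseIdx (PySem.Int.mod i s.length).toNat) := by
  unfold PySem.List.pop?
  rw [pyIdx_norm _ _ h1 h2]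
  simp [Option.bind, List.getElem?_eq_getElem (mod_idx_lt _ _ h1 h2)]

theorem swap_cons_perm : ∀ (xs : List Char) (j : Nat) (x : Char) (hj : j < xs.length),
    (xs[j] :: xs.set j x).Perm (x :: xs)
  | y :: t, 0, x, _ => by simpa using List.Perm.swap x y t
  | y :: t, j+1, x, hj => by
    have ih := swap_cons_perm t j x (by simpa using hj)
    simpa using ((List.Perm.swap y _ _).trans ((ih.cons y).trans (List.Perm.swap x y t)))

theorem set_set_perm_lt : ∀ (xs : List Char) (i j : Nat) (hij : i < j) (hj : j < xs.length),
    ((xs.set i (xs[j])).set j (xs[i]'(lt_trans hij hj))).Perm xs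
  | x :: t, 0, j+1, _, hj => by
    simpa using swap_cons_perm t j x (by simpa using hj)
  | x :: t, i+1, j+1, hij, hj => by
    have ih := set_set_perm_lt t i j (by omega) (by simpa using hj)
    simpa using ih.cons x

theorem set_set_perm (xs : List Char) (i j : Nat) (hi : i < xs.length) (hj : j < xs.length) :
    ((xs.set i (xs[j])).set j (xs[i]'hi)).Perm xs := by
  rcases lt_trichotomy i j with h | h | h
  · exact set_set_perm_lt xs i j h hj
  · subst h; simp [List.set_getElem_self]
  · rw [List.set_comm _ _ (by omega : i ≠ j)]
    exact set_set_perm_lt xs j i h hi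

theorem rotK_eq (s : List Char) (k : Nat) (hk : k ≤ s.length) :
    PySem.List.slice s (some (k : Int)) none ++ PySem.List.slice s none (some (k : Int))
      = s.rotate k := by
  rw [PySem.List.slice_from_natCast, PySem.List.slice_to_natCast,
    List.rotate_eq_drop_append_take hk]

theorem rotL1_eq (s : List Char) : pvRotL1 s = s.rotate 1 := by
  cases s with
  | nil => rfl
  | cons x t =>
    unfold pvRotL1
    exact_mod_cast rotK_eq (x :: t) 1 (by simp)

theorem rotR1_eq (s : List Char) : pvRotR1 s = s.rotate (s.length - 1) := by
  unfold pvRotR1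
  rw [PySem.List.slice_from_neg_one, PySem.List.slice_to_neg_one, List.dropLast_eq_take,
    List.rotate_eq_drop_append_take (by omega)]

theorem rotRN_eq (k : Nat) (t : List Char) : pvRotRN k t = t.rotate (k * (t.length - 1)) := by
  induction k generalizing t with
  | zero => simp [pvRotRN]
  | succ k ih =>
    show pvRotRN k (pvRotR1 t) = _
    rw [ih, rotR1_eq, List.length_rotate, List.rotate_rotate]
    congr 1
    ring_nf

theorem pymod_eq_emod (x : Int) (n : Nat) (hn : 0 < n) :
    PySem.Int.mod x (n : Int) = x % (n : Int) := by
  unfold PySem.Int.mod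
  rw [Int.fmod_eq_emod]
  simp [show (0:Int) ≤ (n:Int) by omega]

theorem index_nodup_eq (xs : List Char) (hn : xs.Nodup) (m : Nat) (hm : m < xs.length) :
    PySem.List.index? xs (xs[m]'hm) = some m := by
  have hmem : xs[m]'hm ∈ xs := List.getElem_mem hm
  have hs : (PySem.List.index? xs (xs[m]'hm)).isSome = true :=
    (PySem.List.index?_isSome_iff xs _).2 hmem
  obtain ⟨k, hk⟩ := Option.isSome_iff_exists.mp hs
  obtain ⟨hkl, hkv, -⟩ := PySem.List.getElem_of_index?_eq_some hk
  rw [hk]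
  congr 1
  exact (hn.getElem_inj_iff.mp hkv)

theorem jB_eq (i k n : Nat) (hn : 0 < n) (hk : k ≤ n) :
    PySem.Int.mod ((i : Int) - (k : Int)) (n : Int) = (((i + (n - k)) % n : Nat) : Int) := by
  rw [pymod_eq_emod _ _ hn]
  have h1 : ((i : Int) - k) % n = ((i : Int) - k + n) % n := (Int.add_emod_right _ _).symm
  have h2 : ((i : Int) - k + n) = ((i + (n - k) : Nat) : Int) := by push_cast [hk]; ring
  rw [h1, h2]
  push_cast
  ring

theorem idx_rotate (s : List Char) (hnd : s.Nodup) (ch : Char) (i : Nat)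
    (hidx : PySem.List.index? s ch = some i) (k : Nat) (hk : k ≤ s.length) :
    PySem.List.index? (s.rotate k) ch = some ((i + (s.length - k)) % s.length) := by
  obtain ⟨hi, hv, -⟩ := PySem.List.getElem_of_index?_eq_some hidx
  have hn : 0 < s.length := by omega
  set n := s.length with hndef
  have hm : (i + (n - k)) % n < (s.rotate k).length := by
    rw [List.length_rotate]; exact Nat.mod_lt _ hn
  have hval : (s.rotate k)[(i + (n - k)) % n]'hm = ch := by
    rw [List.getElem_rotate]
    have harg : ((i + (n - k)) % n + k) % s.length = i := by
      rw [← hndef, Nat.mod_add_mod]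
      have h3 : i + (n - k) + k = i + n := by omega
      rw [h3, Nat.add_mod_right, Nat.mod_eq_of_lt hi]
    simp only [harg]
    exact hv
  have := index_nodup_eq (s.rotate k) (List.nodup_rotate.mpr hnd) _ hm
  rw [hval] at this
  exact this

-- proof-side mirror of the rotation amount
def shiftN (j : Nat) : Nat := j + 1 + (if 4 ≤ j then 1 else 0)

theorem altShift_cast (j : Nat) : altShift (j : Int) = ((shiftN j : Nat) : Int) := by
  unfold altShift shiftN
  by_cases h : 4 ≤ j
  · rw [if_pos (by exact_mod_cast h), if_pos h]; push_cast; ring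
  · rw [if_neg (by exact_mod_cast h), if_neg h]; push_cast; ring

theorem fwd_rot (s : List Char) (ctok : String) (ch : Char) (i : Nat)
    (hc : ctok.toList = [ch]) (hnd : s.Nodup) (hidx : PySem.List.index? s ch = some i)
    (k : Nat) (hk : k ≤ s.length) :
    pvFwd (s.rotate k) ctok
      = s.rotate (k + shiftN ((i + (s.length - k)) % s.length) * (s.length - 1)) := by
  have h1 : pvIndexTok (s.rotate k) ctok = some ((i + (s.length - k)) % s.length) := by
    simp only [pvIndexTok, hc]
    exact idx_rotate s hnd ch i hidx k hk
  have hn : 0 < s.length := by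
    obtain ⟨hi, -, -⟩ := PySem.List.getElem_of_index?_eq_some hidx
    omega
  simp only [pvFwd, h1, rotRN_eq, List.length_rotate, List.rotate_rotate, shiftN]

theorem testA_iff (s : List Char) (ctok : String) (ch : Char) (i : Nat)
    (hc : ctok.toList = [ch]) (hnd : s.Nodup) (hidx : PySem.List.index? s ch = some i)
    (k : Nat) (hk : k ≤ s.length) :
    (s = pvFwd (s.rotate k) ctok)
      ↔ (k + shiftN ((i + (s.length - k)) % s.length) * (s.length - 1)) % s.length = 0 := by
  have hn : 0 < s.length := by
    obtain ⟨hi, -, -⟩ := PySem.List.getElem_of_index?_eq_some hidx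
    omega
  rw [fwd_rot s ctok ch i hc hnd hidx k hk, eq_comm, hnd.rotate_eq_self_iff]
  constructor
  · rintro (h | h)
    · exact h
    · exfalso; rw [h] at hn; simp at hn
  · exact fun h => Or.inl h

theorem testB_iff (i k n : Nat) (hn : 0 < n) (hk : k < n) :
    (PySem.Int.mod (altShift (PySem.Int.mod ((i : Int) - (k : Int)) (n : Int)) - (k : Int)) (n : Int) = 0)
      ↔ (k + shiftN ((i + (n - k)) % n) * (n - 1)) % n = 0 := by
  rw [jB_eq i k n hn (le_of_lt hk), altShift_cast, PySem.Int.mod_eq_zero_iff_dvd]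
  set r := shiftN ((i + (n - k)) % n) with hr
  have h2 : ((k + r * (n - 1) : Nat) : Int) = (r : Int) * (n : Int) + ((k : Int) - (r : Int)) := by
    push_cast [show 1 ≤ n by omega]
    ring
  rw [← Nat.dvd_iff_mod_eq_zero, ← Int.natCast_dvd_natCast, h2,
    dvd_add_right (dvd_mul_left (n : Int) (r : Int)), dvd_sub_comm]

theorem search_loop (s : List Char) (ctok : String) (ch : Char) (i : Nat)
    (hc : ctok.toList = [ch]) (hnd : s.Nodup) (hidx : PySem.List.index? s ch = some i) :
    ∀ (m k : Nat), k + m = s.length →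
    (∃ k0, k ≤ k0 ∧ k0 < s.length ∧
      PySem.Int.mod (altShift (PySem.Int.mod ((i : Int) - (k0 : Int)) (s.length : Int)) - (k0 : Int))
        (s.length : Int) = 0) →
    pvSearch ctok s (m+1) (s.rotate k)
      = altLoop s (i : Int) (s.length : Int) (PySem.List.pyRange (k : Int) (s.length : Int) 1) := by
  have hi : i < s.length := by
    obtain ⟨h, -, -⟩ := PySem.List.getElem_of_index?_eq_some hidx
    exact h
  intro m
  induction m with
  | zero =>
    rintro k hkm ⟨k0, h1, h2, -⟩
    omega
  | succ m ih =>
    intro k hkm hex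
    have hn : 0 < s.length := by omega
    have hklt : k < s.length := by omega
    rw [PySem.List.pyRange_one_cons (by exact_mod_cast hklt)]
    by_cases ht : PySem.Int.mod (altShift (PySem.Int.mod ((i : Int) - (k : Int)) (s.length : Int))
        - (k : Int)) (s.length : Int) = 0
    · have hA : s = pvFwd (s.rotate k) ctok :=
        (testA_iff s ctok ch i hc hnd hidx k (le_of_lt hklt)).2
          ((testB_iff i k s.length hn hklt).1 ht)
      show (if s = pvFwd (s.rotate k) ctok then s.rotate k
        else pvSearch ctok s (m+1) (pvRotL1 (s.rotate k))) = _
      rw [if_pos hA]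
      show _ = altLoop s (i : Int) (s.length : Int) ((k : Int) :: _)
      unfold altLoop
      rw [if_pos ht, rotK_eq s k (le_of_lt hklt)]
    · have hA : ¬ (s = pvFwd (s.rotate k) ctok) := fun h =>
        ht ((testB_iff i k s.length hn hklt).2
          ((testA_iff s ctok ch i hc hnd hidx k (le_of_lt hklt)).1 h))
      show (if s = pvFwd (s.rotate k) ctok then s.rotate k
        else pvSearch ctok s (m+1) (pvRotL1 (s.rotate k))) = _
      rw [if_neg hA]
      show _ = altLoop s (i : Int) (s.length : Int) ((k : Int) :: _)
      unfold altLoop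
      rw [if_neg ht, rotL1_eq, List.rotate_rotate]
      obtain ⟨k0, hk01, hk02, hk03⟩ := hex
      have hk0k : k0 ≠ k := fun h => ht (h ▸ hk03)
      have := ih (k + 1) (by omega) ⟨k0, by omega, hk02, hk03⟩
      rw [show ((k : Int) + 1) = (((k + 1 : Nat)) : Int) by push_cast; ring]
      exact this

theorem natmod_modeq (a n : Nat) : Int.ModEq (n : Int) ((a % n : Nat) : Int) (a : Int) := by
  show ((a % n : Nat) : Int) % n = (a : Int) % n
  push_cast
  exact Int.emod_emod_of_dvd _ dvd_rfl

theorem nat_eq_of_modeq (x j n : Nat) (hx : x < n) (hj : j < n)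
    (h : Int.ModEq (n : Int) (x : Int) (j : Int)) : x = j := by
  have h2 : (x : Int) % n = (j : Int) % n := h
  rw [Int.emod_eq_of_lt (by omega) (by omega), Int.emod_eq_of_lt (by omega) (by omega)] at h2
  omega

theorem sub_nat_modeq (i k n : Nat) (hk : k ≤ n) :
    Int.ModEq (n : Int) ((i + (n - k) : Nat) : Int) ((i : Int) - (k : Int)) := by
  have : ((i + (n - k) : Nat) : Int) = ((i : Int) - (k : Int)) + (n : Int) * 1 := by
    push_cast [hk]; ring
  rw [this]
  show _ % _ = _ % _
  rw [Int.add_mul_emod_self_left]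

theorem based_eq (s : List Char) (ctok : String) (ch : Char) (i : Nat)
    (hc : ctok.toList = [ch]) (hnd : s.Nodup) (hidx : PySem.List.index? s ch = some i)
    (hsurj : ∀ i' < s.length, ∃ j, j < s.length ∧
      (j + (j + 1 + (if 4 ≤ j then 1 else 0))) % s.length = i') :
    pvSearch ctok s (s.length + 1) s
      = altLoop s (i : Int) (s.length : Int) (PySem.List.pyRange 0 (s.length : Int) 1) := by
  obtain ⟨hi, hv, -⟩ := PySem.List.getElem_of_index?_eq_some hidx
  have hn : 0 < s.length := by omega
  obtain ⟨j, hj, hjeq⟩ := hsurj i hi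
  have hjeq' : (j + shiftN j) % s.length = i := hjeq
  set k0 := (i + (s.length - j)) % s.length with hk0def
  have hk0 : k0 < s.length := Nat.mod_lt _ hn
  have c1 : Int.ModEq (s.length : Int) (k0 : Int) ((i : Int) - (j : Int)) :=
    (natmod_modeq _ _).trans (sub_nat_modeq i j s.length (le_of_lt hj))
  have htest : PySem.Int.mod (altShift (PySem.Int.mod ((i : Int) - (k0 : Int)) (s.length : Int))
      - (k0 : Int)) (s.length : Int) = 0 := by
    rw [jB_eq i k0 s.length hn (le_of_lt hk0)]
    have hjb : (i + (s.length - k0)) % s.length = j := by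
      apply nat_eq_of_modeq _ _ _ (Nat.mod_lt _ hn) hj
      have c3 : Int.ModEq (s.length : Int) (((i + (s.length - k0)) % s.length : Nat) : Int)
          ((i : Int) - (k0 : Int)) :=
        (natmod_modeq _ _).trans (sub_nat_modeq i k0 s.length (le_of_lt hk0))
      refine c3.trans ?_
      have c4 : Int.ModEq (s.length : Int) ((i : Int) - (k0 : Int))
          ((i : Int) - ((i : Int) - (j : Int))) := (Int.ModEq.refl (i : Int)).sub c1
      refine c4.trans ?_
      have : (i : Int) - ((i : Int) - (j : Int)) = (j : Int) := by ring
      rw [this]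
    rw [hjb, altShift_cast, PySem.Int.mod_eq_zero_iff_dvd, ← Int.modEq_zero_iff_dvd]
    have c5 : Int.ModEq (s.length : Int) ((shiftN j : Nat) : Int) ((i : Int) - (j : Int)) := by
      have c6 : Int.ModEq (s.length : Int) (((j + shiftN j) % s.length : Nat) : Int)
          ((j : Int) + ((shiftN j : Nat) : Int)) := by
        have := natmod_modeq (j + shiftN j) s.length
        rw [show (((j + shiftN j : Nat)) : Int) = (j : Int) + ((shiftN j : Nat) : Int) by push_cast; ring] at this
        exact this
      have c7 : Int.ModEq (s.length : Int) ((i : Nat) : Int)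
          ((j : Int) + ((shiftN j : Nat) : Int)) := by
        rw [← hjeq']; exact c6
      have := (c7.symm.sub (Int.ModEq.refl (j : Int)))
      rw [show (j : Int) + ((shiftN j : Nat) : Int) - (j : Int) = ((shiftN j : Nat) : Int) by ring] at this
      exact this
    have := c5.sub c1
    rw [show ((i : Int) - (j : Int)) - ((i : Int) - (j : Int)) = 0 by ring] at this
    exact this
  have h0 := search_loop s ctok ch i hc hnd hidx s.length 0 (by omega) ⟨k0, by omega, hk0, htest⟩
  rw [List.rotate_zero] at h0
  exact_mod_cast h0

theorem len4_shape (t : List String) (h : t.length = 4) : ∃ a b c d, t = [a, b, c, d] := by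
  rcases t with - | ⟨a, t⟩; · simp at h
  rcases t with - | ⟨b, t⟩; · simp at h
  rcases t with - | ⟨c, t⟩; · simp at h
  rcases t with - | ⟨d, t⟩; · simp at h
  rcases t with - | ⟨e, t⟩
  · exact ⟨a, b, c, d, rfl⟩
  · simp at h

theorem len5_shape (t : List String) (h : t.length = 5) : ∃ a b c d e, t = [a, b, c, d, e] := by
  rcases t with - | ⟨a, t⟩; · simp at h
  obtain ⟨b, c, d, e, rfl⟩ := len4_shape t (by simpa using h)
  exact ⟨a, b, c, d, e, rfl⟩

theorem len6_shape (t : List String) (h : t.length = 6) : ∃ a b c d e f, t = [a, b, c, d, e, f] := by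
  rcases t with - | ⟨a, t⟩; · simp at h
  obtain ⟨b, c, d, e, f, rfl⟩ := len5_shape t (by simpa using h)
  exact ⟨a, b, c, d, e, f, rfl⟩

theorem len7_shape (t : List String) (h : t.length = 7) : ∃ a b c d e f g, t = [a, b, c, d, e, f, g] := by
  rcases t with - | ⟨a, t⟩; · simp at h
  obtain ⟨b, c, d, e, f, g, rfl⟩ := len6_shape t (by simpa using h)
  exact ⟨a, b, c, d, e, f, g, rfl⟩

theorem rot_slice_perm (s : List Char) (k : Int) :
    (PySem.List.slice s (some k) none ++ PySem.List.slice s none (some k)).Perm s := by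
  have h1 : PySem.List.slice s (some k) none = s.drop (PySem.List.clampIdx s.length k) :=
    PySem.List.slice_some_none s k
  have h2 : PySem.List.slice s none (some k) = s.take (PySem.List.clampIdx s.length k) := by
    simp [PySem.List.slice]
  rw [h1, h2]
  have : (s.drop (PySem.List.clampIdx s.length k) ++ s.take (PySem.List.clampIdx s.length k)).Perm
      (s.take (PySem.List.clampIdx s.length k) ++ s.drop (PySem.List.clampIdx s.length k)) :=
    List.perm_append_comm
  rwa [List.take_append_drop] at this

theorem insert_perm (xs : List Char) (i : Int) (v : Char) :
    (PySem.List.insert xs i v).Perm (v :: xs) := by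
  unfold PySem.List.insert
  rcases h : PySem.List.sliceIndices xs.length (some i) none 1 with ⟨k, f, g⟩
  have : (xs.take k.toNat ++ v :: xs.drop k.toNat).Perm
      (v :: (xs.take k.toNat ++ xs.drop k.toNat)) := List.perm_middle
  rwa [List.take_append_drop] at this

theorem altLoop_perm (s : List Char) (i n : Int) :
    ∀ ks : List Int, (altLoop s i n ks).Perm s
  | [] => List.Perm.refl s
  | k :: ks => by
    unfold altLoop
    by_cases h : PySem.Int.mod (altShift (PySem.Int.mod (i - k) n) - k) n = 0
    · rw [if_pos h]; exact rot_slice_perm s k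
    · rw [if_neg h]; exact altLoop_perm s i n ks

theorem pySwap_norm (s : List Char) (a b : Int)
    (ha1 : -(s.length : Int) ≤ a) (ha2 : a < s.length)
    (hb1 : -(s.length : Int) ≤ b) (hb2 : b < s.length) :
    (match PySem.List.pyGet? s b, PySem.List.pyGet? s a with
     | some vb, some va => PySem.List.pySetD (PySem.List.pySetD s a vb) b va
     | _, _ => s)
    = (s.set (PySem.Int.mod a s.length).toNat
          (s[(PySem.Int.mod b s.length).toNat]'(mod_idx_lt _ _ hb1 hb2))).set
        (PySem.Int.mod b s.length).toNat
        (s[(PySem.Int.mod a s.length).toNat]'(mod_idx_lt _ _ ha1 ha2)) := by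
  rw [pyGet_norm s b hb1 hb2, pyGet_norm s a ha1 ha2]
  show PySem.List.pySetD (PySem.List.pySetD s a _) b _ = _
  rw [pySetD_norm s a _ ha1 ha2,
    pySetD_norm _ b _ (by simpa using hb1) (by simpa using hb2)]
  simp [List.length_set]

theorem rev_perm (s : List Char) (a b : Int) (ha : 0 ≤ a) (hab : a ≤ b) :
    (PySem.List.slice s none (some a) ++ (PySem.List.slice s (some a) (some (b+1))).reverse
      ++ PySem.List.slice s (some (b+1)) none).Perm s := by
  rw [PySem.List.slice_to s ha, PySem.List.slice_toNat s ha (by omega), PySem.List.slice_from s (by omega)]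
  have hle : a.toNat ≤ (b+1).toNat := by omega
  have hdd : s.drop ((b+1).toNat) = (s.drop a.toNat).drop ((b+1).toNat - a.toNat) := by
    rw [List.drop_drop]; congr 1; omega
  have base : s.take a.toNat ++ ((s.drop a.toNat).take ((b+1).toNat - a.toNat) ++ s.drop (b+1).toNat) = s := by
    rw [hdd, List.take_append_drop, List.take_append_drop]
  have hp : ((((s.drop a.toNat).take ((b+1).toNat - a.toNat)).reverse ++ s.drop (b+1).toNat)).Perm
      ((s.drop a.toNat).take ((b+1).toNat - a.toNat) ++ s.drop (b+1).toNat) :=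
    (List.reverse_perm _).append_right _
  have := hp.append_left (s.take a.toNat)
  rw [base] at this
  simpa [List.append_assoc] using this

theorem altUndo_none (tok : List String) (s : List Char)
    (h1 : ∀ x y : String, tok = ["swap", "position", x, "with", "position", y] → False)
    (h2 : ∀ a b : String, tok = ["swap", "letter", a, "with", "letter", b] → False)
    (h3 : ∀ d x : String, tok = ["rotate", d, x, "step"] → False)
    (h4 : ∀ d x : String, tok = ["rotate", d, x, "steps"] → False)
    (h5 : ∀ x y : String, tok = ["reverse", "positions", x, "through", y] → False)
    (h6 : ∀ x y : String, tok = ["move", "position", x, "to", "position", y] → False)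
    (h7 : ∀ c : String, tok = ["rotate", "based", "on", "position", "of", "letter", c] → False) :
    altUndo tok s = s := by
  unfold altUndo
  rw [if_neg, if_neg, if_neg, if_neg, if_neg, if_neg]
  · intro hc
    simp only [Bool.and_eq_true, beq_iff_eq] at hc
    obtain ⟨hL, hsl⟩ := hc
    obtain ⟨a0, a1, a2, a3, a4, a5, a6, rfl⟩ := len7_shape tok (by exact_mod_cast hL)
    rw [show PySem.List.slice [a0, a1, a2, a3, a4, a5, a6] none (some 6)
        = [a0, a1, a2, a3, a4, a5] from rfl] at hsl
    simp only [List.cons.injEq, and_true] at hsl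
    obtain ⟨e0, e1, e2, e3, e4, e5⟩ := hsl
    subst e0; subst e1; subst e2; subst e3; subst e4; subst e5
    exact h7 a6 rfl
  · intro hc
    simp only [Bool.and_eq_true, beq_iff_eq] at hc
    obtain ⟨⟨⟨⟨hL, e0⟩, e1⟩, e3⟩, e4⟩ := hc
    obtain ⟨a0, a1, a2, a3, a4, a5, rfl⟩ := len6_shape tok (by exact_mod_cast hL)
    rw [show PySem.List.pyGetD [a0, a1, a2, a3, a4, a5] (0 : Int) "" = a0 from rfl] at e0
    rw [show PySem.List.pyGetD [a0, a1, a2, a3, a4, a5] (1 : Int) "" = a1 from rfl] at e1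
    rw [show PySem.List.pyGetD [a0, a1, a2, a3, a4, a5] (3 : Int) "" = a3 from rfl] at e3
    rw [show PySem.List.pyGetD [a0, a1, a2, a3, a4, a5] (4 : Int) "" = a4 from rfl] at e4
    subst e0; subst e1; subst e3; subst e4
    exact h6 a2 a5 rfl
  · intro hc
    simp only [Bool.and_eq_true, beq_iff_eq] at hc
    obtain ⟨⟨⟨hL, e0⟩, e1⟩, e3⟩ := hc
    obtain ⟨a0, a1, a2, a3, a4, rfl⟩ := len5_shape tok (by exact_mod_cast hL)
    rw [show PySem.List.pyGetD [a0, a1, a2, a3, a4] (0 : Int) "" = a0 from rfl] at e0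
    rw [show PySem.List.pyGetD [a0, a1, a2, a3, a4] (1 : Int) "" = a1 from rfl] at e1
    rw [show PySem.List.pyGetD [a0, a1, a2, a3, a4] (3 : Int) "" = a3 from rfl] at e3
    subst e0; subst e1; subst e3
    exact h5 a2 a4 rfl
  · intro hc
    simp only [Bool.and_eq_true, Bool.or_eq_true, beq_iff_eq] at hc
    obtain ⟨⟨⟨hL, e0⟩, -⟩, e3⟩ := hc
    obtain ⟨a0, a1, a2, a3, rfl⟩ := len4_shape tok (by exact_mod_cast hL)
    rw [show PySem.List.pyGetD [a0, a1, a2, a3] (0 : Int) "" = a0 from rfl] at e0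
    rw [show PySem.List.pyGetD [a0, a1, a2, a3] (3 : Int) "" = a3 from rfl] at e3
    subst e0
    rcases e3 with e3 | e3 <;> subst e3
    · exact h3 a1 a2 rfl
    · exact h4 a1 a2 rfl
  · intro hc
    simp only [Bool.and_eq_true, beq_iff_eq] at hc
    obtain ⟨⟨⟨⟨hL, e0⟩, e1⟩, e3⟩, e4⟩ := hc
    obtain ⟨a0, a1, a2, a3, a4, a5, rfl⟩ := len6_shape tok (by exact_mod_cast hL)
    rw [show PySem.List.pyGetD [a0, a1, a2, a3, a4, a5] (0 : Int) "" = a0 from rfl] at e0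
    rw [show PySem.List.pyGetD [a0, a1, a2, a3, a4, a5] (1 : Int) "" = a1 from rfl] at e1
    rw [show PySem.List.pyGetD [a0, a1, a2, a3, a4, a5] (3 : Int) "" = a3 from rfl] at e3
    rw [show PySem.List.pyGetD [a0, a1, a2, a3, a4, a5] (4 : Int) "" = a4 from rfl] at e4
    subst e0; subst e1; subst e3; subst e4
    exact h2 a2 a5 rfl
  · intro hc
    simp only [Bool.and_eq_true, beq_iff_eq] at hc
    obtain ⟨⟨⟨⟨hL, e0⟩, e1⟩, e3⟩, e4⟩ := hc
    obtain ⟨a0, a1, a2, a3, a4, a5, rfl⟩ := len6_shape tok (by exact_mod_cast hL)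
    rw [show PySem.List.pyGetD [a0, a1, a2, a3, a4, a5] (0 : Int) "" = a0 from rfl] at e0
    rw [show PySem.List.pyGetD [a0, a1, a2, a3, a4, a5] (1 : Int) "" = a1 from rfl] at e1
    rw [show PySem.List.pyGetD [a0, a1, a2, a3, a4, a5] (3 : Int) "" = a3 from rfl] at e3
    rw [show PySem.List.pyGetD [a0, a1, a2, a3, a4, a5] (4 : Int) "" = a4 from rfl] at e4
    subst e0; subst e1; subst e3; subst e4
    exact h1 a2 a5 rfl

theorem apply_none (tok : List String) (s : List Char)
    (h1 : ∀ x y : String, tok = ["swap", "position", x, "with", "position", y] → False)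
    (h2 : ∀ a b : String, tok = ["swap", "letter", a, "with", "letter", b] → False)
    (h3 : ∀ d x : String, tok = ["rotate", d, x, "step"] → False)
    (h4 : ∀ d x : String, tok = ["rotate", d, x, "steps"] → False)
    (h5 : ∀ x y : String, tok = ["reverse", "positions", x, "through", y] → False)
    (h6 : ∀ x y : String, tok = ["move", "position", x, "to", "position", y] → False)
    (h7 : ∀ c : String, tok = ["rotate", "based", "on", "position", "of", "letter", c] → False) :
    pvApply s tok = s := by
  unfold pvApply
  split
  · exact absurd rfl (fun h => h1 _ _ h)
  · exact absurd rfl (fun h => h2 _ _ h)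
  · exact absurd rfl (fun h => h3 _ _ h)
  · exact absurd rfl (fun h => h4 _ _ h)
  · exact absurd rfl (fun h => h5 _ _ h)
  · exact absurd rfl (fun h => h6 _ _ h)
  · exact absurd rfl (fun h => h7 _ h)
  · rfl

theorem apply_eq (chars s : List Char) (tok : List String) (hperm : s.Perm chars)
    (hok : pvPreRule chars tok = true) :
    pvApply s tok = altUndo tok s ∧ (pvApply s tok).Perm chars := by
  have hlen : s.length = chars.length := hperm.length_eq
  conv_lhs => unfold pvApply
  split
  next x y =>
    simp only [pvPreRule] at hok
    rcases hx : PySem.Int.ofStr? x with - | a <;> rw [hx] at hok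
    · simp at hok
    rcases hy : PySem.Int.ofStr? y with - | b <;> rw [hy] at hok
    · simp at hok
    simp only [Bool.and_eq_true, decide_eq_true_eq] at hok
    obtain ⟨⟨⟨ha1, ha2⟩, hb1⟩, hb2⟩ := hok
    rw [← hlen] at ha1 ha2 hb1 hb2
    have hA := pySwap_norm s a b ha1 ha2 hb1 hb2
    constructor
    · show (match some a, some b with
        | some a, some b =>
          match PySem.List.pyGet? s b, PySem.List.pyGet? s a with
          | some vb, some va => PySem.List.pySetD (PySem.List.pySetD s a vb) b va
          | _, _ => s
        | _, _ => s) = _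
      rw [show altUndo ["swap", "position", x, "with", "position", y] s
          = (match PySem.Int.ofStr? x, PySem.Int.ofStr? y with
             | some a, some b => altSwap s a b
             | _, _ => s) from rfl, hx, hy]
      rfl
    · show (pvApply s ["swap", "position", x, "with", "position", y]).Perm chars
      rw [show pvApply s ["swap", "position", x, "with", "position", y]
          = (match PySem.Int.ofStr? x, PySem.Int.ofStr? y with
             | some a, some b =>
               match PySem.List.pyGet? s b, PySem.List.pyGet? s a with
               | some vb, some va => PySem.List.pySetD (PySem.List.pySetD s a vb) b va
               | _, _ => s
             | _, _ => s) from rfl, hx, hy]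
      show (match PySem.List.pyGet? s b, PySem.List.pyGet? s a with
        | some vb, some va => PySem.List.pySetD (PySem.List.pySetD s a vb) b va
        | _, _ => s).Perm chars
      rw [hA]
      exact (set_set_perm s _ _ (mod_idx_lt _ _ ha1 ha2) (mod_idx_lt _ _ hb1 hb2)).trans hperm
  next a b =>
    simp only [pvPreRule, Bool.and_eq_true] at hok
    obtain ⟨hca, hcb⟩ := hok
    rcases ha : a.toList with - | ⟨ca, arest⟩ <;> rw [ha] at hca
    · simp at hca
    rcases arest with - | ⟨c2, arest⟩
    swap
    · simp at hca
    rcases hb : b.toList with - | ⟨cb, brest⟩ <;> rw [hb] at hcb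
    · simp at hcb
    rcases brest with - | ⟨c2, brest⟩
    swap
    · simp at hcb
    have hca' : ca ∈ chars := by
      have h' : chars.contains ca = true := hca
      simpa using h'
    have hcb' : cb ∈ chars := by
      have h' : chars.contains cb = true := hcb
      simpa using h'
    have hmem_a : ca ∈ s := hperm.mem_iff.mpr hca'
    have hmem_b : cb ∈ s := hperm.mem_iff.mpr hcb'
    obtain ⟨i, hia⟩ := Option.isSome_iff_exists.mp ((PySem.List.index?_isSome_iff s ca).2 hmem_a)
    obtain ⟨j, hjb⟩ := Option.isSome_iff_exists.mp ((PySem.List.index?_isSome_iff s cb).2 hmem_b)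
    obtain ⟨hilt, hiv, -⟩ := PySem.List.getElem_of_index?_eq_some hia
    obtain ⟨hjlt, hjv, -⟩ := PySem.List.getElem_of_index?_eq_some hjb
    have hIa : pvIndexTok s a = some i := by simp only [pvIndexTok, ha]; exact hia
    have hIb : pvIndexTok s b = some j := by simp only [pvIndexTok, hb]; exact hjb
    have hAIa : altIndex s a = some i := by simp only [altIndex, ha]; exact hia
    have hAIb : altIndex s b = some j := by simp only [altIndex, hb]; exact hjb
    have bi1 : -(s.length : Int) ≤ (i : Int) := by omega
    have bi2 : (i : Int) < s.length := by exact_mod_cast hilt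
    have bj1 : -(s.length : Int) ≤ (j : Int) := by omega
    have bj2 : (j : Int) < s.length := by exact_mod_cast hjlt
    have hA := pySwap_norm s (i : Int) (j : Int) bi1 bi2 bj1 bj2
    constructor
    · show (match pvIndexTok s a, pvIndexTok s b with
        | some i, some j =>
          match PySem.List.pyGet? s (j : Int), PySem.List.pyGet? s (i : Int) with
          | some vj, some vi =>
            PySem.List.pySetD (PySem.List.pySetD s (i : Int) vj) (j : Int) vi
          | _, _ => s
        | _, _ => s) = _
      rw [hIa, hIb,
        show altUndo ["swap", "letter", a, "with", "letter", b] s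
          = (match altIndex s a, altIndex s b with
             | some i, some j => altSwap s (i : Int) (j : Int)
             | _, _ => s) from rfl, hAIa, hAIb]
      rfl
    · show (pvApply s ["swap", "letter", a, "with", "letter", b]).Perm chars
      rw [show pvApply s ["swap", "letter", a, "with", "letter", b]
          = (match pvIndexTok s a, pvIndexTok s b with
             | some i, some j =>
               match PySem.List.pyGet? s (j : Int), PySem.List.pyGet? s (i : Int) with
               | some vj, some vi =>
                 PySem.List.pySetD (PySem.List.pySetD s (i : Int) vj) (j : Int) vi
               | _, _ => s
             | _, _ => s) from rfl, hIa, hIb]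
      show (match PySem.List.pyGet? s (j : Int), PySem.List.pyGet? s (i : Int) with
        | some vj, some vi =>
          PySem.List.pySetD (PySem.List.pySetD s (i : Int) vj) (j : Int) vi
        | _, _ => s).Perm chars
      rw [hA]
      exact (set_set_perm s _ _ (mod_idx_lt _ _ bi1 bi2) (mod_idx_lt _ _ bj1 bj2)).trans hperm
  next d x =>
    simp only [pvPreRule, Bool.and_eq_true, Bool.or_eq_true, beq_iff_eq,
      Option.isSome_iff_exists] at hok
    obtain ⟨hd, v, hv⟩ := hok
    have hif : d = "left" ∨ d = "right" := hd
    rcases hd with rfl | rfl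
    · constructor
      · show (if ("left" : String) = "left" ∨ ("left" : String) = "right" then
            match PySem.Int.ofStr? x with
            | some v =>
              let X := v * (if ("left" : String) = "left" then -1 else 1)
              PySem.List.slice s (some X) none ++ PySem.List.slice s none (some X)
            | none => s
          else s) = _
        rw [if_pos hif, hv,
          show altUndo ["rotate", "left", x, "step"] s
            = (match PySem.Int.ofStr? x with
               | some v =>
                 let k := if ("left" : String) == "right" then v else -v
                 PySem.List.slice s (some k) none ++ PySem.List.slice s none (some k)
               | none => s) from rfl, hv]
        simp
      · show (pvApply s ["rotate", "left", x, "step"]).Perm chars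
        rw [show pvApply s ["rotate", "left", x, "step"]
            = (if ("left" : String) = "left" ∨ ("left" : String) = "right" then
                match PySem.Int.ofStr? x with
                | some v =>
                  let X := v * (if ("left" : String) = "left" then -1 else 1)
                  PySem.List.slice s (some X) none ++ PySem.List.slice s none (some X)
                | none => s
              else s) from rfl, if_pos hif, hv]
        exact (rot_slice_perm s _).trans hperm
    · constructor
      · show (if ("right" : String) = "left" ∨ ("right" : String) = "right" then
            match PySem.Int.ofStr? x with
            | some v =>
              let X := v * (if ("right" : String) = "left" then -1 else 1)
              PySem.List.slice s (some X) none ++ PySem.List.slice s none (some X)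
            | none => s
          else s) = _
        rw [if_pos hif, hv,
          show altUndo ["rotate", "right", x, "step"] s
            = (match PySem.Int.ofStr? x with
               | some v =>
                 let k := if ("right" : String) == "right" then v else -v
                 PySem.List.slice s (some k) none ++ PySem.List.slice s none (some k)
               | none => s) from rfl, hv]
        simp
      · show (pvApply s ["rotate", "right", x, "step"]).Perm chars
        rw [show pvApply s ["rotate", "right", x, "step"]
            = (if ("right" : String) = "left" ∨ ("right" : String) = "right" then
                match PySem.Int.ofStr? x with
                | some v =>
                  let X := v * (if ("right" : String) = "left" then -1 else 1)
                  PySem.List.slice s (some X) none ++ PySem.List.slice s none (some X)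
                | none => s
              else s) from rfl, if_pos hif, hv]
        exact (rot_slice_perm s _).trans hperm
  next d x =>
    simp only [pvPreRule, Bool.and_eq_true, Bool.or_eq_true, beq_iff_eq,
      Option.isSome_iff_exists] at hok
    obtain ⟨hd, v, hv⟩ := hok
    have hif : d = "left" ∨ d = "right" := hd
    rcases hd with rfl | rfl
    · constructor
      · show (if ("left" : String) = "left" ∨ ("left" : String) = "right" then
            match PySem.Int.ofStr? x with
            | some v =>
              let X := v * (if ("left" : String) = "left" then -1 else 1)
              PySem.List.slice s (some X) none ++ PySem.List.slice s none (some X)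
            | none => s
          else s) = _
        rw [if_pos hif, hv,
          show altUndo ["rotate", "left", x, "steps"] s
            = (match PySem.Int.ofStr? x with
               | some v =>
                 let k := if ("left" : String) == "right" then v else -v
                 PySem.List.slice s (some k) none ++ PySem.List.slice s none (some k)
               | none => s) from rfl, hv]
        simp
      · show (pvApply s ["rotate", "left", x, "steps"]).Perm chars
        rw [show pvApply s ["rotate", "left", x, "steps"]
            = (if ("left" : String) = "left" ∨ ("left" : String) = "right" then
                match PySem.Int.ofStr? x with
                | some v =>
                  let X := v * (if ("left" : String) = "left" then -1 else 1)
                  PySem.List.slice s (some X) none ++ PySem.List.slice s none (some X)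
                | none => s
              else s) from rfl, if_pos hif, hv]
        exact (rot_slice_perm s _).trans hperm
    · constructor
      · show (if ("right" : String) = "left" ∨ ("right" : String) = "right" then
            match PySem.Int.ofStr? x with
            | some v =>
              let X := v * (if ("right" : String) = "left" then -1 else 1)
              PySem.List.slice s (some X) none ++ PySem.List.slice s none (some X)
            | none => s
          else s) = _
        rw [if_pos hif, hv,
          show altUndo ["rotate", "right", x, "steps"] s
            = (match PySem.Int.ofStr? x with
               | some v =>
                 let k := if ("right" : String) == "right" then v else -v
                 PySem.List.slice s (some k) none ++ PySem.List.slice s none (some k)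
               | none => s) from rfl, hv]
        simp
      · show (pvApply s ["rotate", "right", x, "steps"]).Perm chars
        rw [show pvApply s ["rotate", "right", x, "steps"]
            = (if ("right" : String) = "left" ∨ ("right" : String) = "right" then
                match PySem.Int.ofStr? x with
                | some v =>
                  let X := v * (if ("right" : String) = "left" then -1 else 1)
                  PySem.List.slice s (some X) none ++ PySem.List.slice s none (some X)
                | none => s
              else s) from rfl, if_pos hif, hv]
        exact (rot_slice_perm s _).trans hperm
  next x y =>
    simp only [pvPreRule] at hok
    rcases hx : PySem.Int.ofStr? x with - | a <;> rw [hx] at hok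
    · simp at hok
    rcases hy : PySem.Int.ofStr? y with - | b <;> rw [hy] at hok
    · simp at hok
    simp only [Bool.and_eq_true, decide_eq_true_eq] at hok
    obtain ⟨⟨ha0, hab⟩, hblt⟩ := hok
    rw [← hlen] at hblt
    constructor
    · show (match some a, some b with
        | some a, some b =>
          PySem.List.slice s none (some a) ++ (PySem.List.slice s (some a) (some (b+1))).reverse
            ++ PySem.List.slice s (some (b+1)) none
        | _, _ => s) = _
      rw [show altUndo ["reverse", "positions", x, "through", y] s
          = (match PySem.Int.ofStr? x, PySem.Int.ofStr? y with
             | some a, some b =>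
               PySem.List.slice s none (some a)
                 ++ ((PySem.List.slice? (PySem.List.slice s (some a) (some (b+1))) none none (-1)).getD [])
                 ++ PySem.List.slice s (some (b+1)) none
             | _, _ => s) from rfl, hx, hy]
      show _ = PySem.List.slice s none (some a)
          ++ ((PySem.List.slice? (PySem.List.slice s (some a) (some (b+1))) none none (-1)).getD [])
          ++ PySem.List.slice s (some (b+1)) none
      rw [PySem.List.slice?_none_none_neg_one, Option.getD_some]
    · show (pvApply s ["reverse", "positions", x, "through", y]).Perm chars
      rw [show pvApply s ["reverse", "positions", x, "through", y]
          = (match PySem.Int.ofStr? x, PySem.Int.ofStr? y with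
             | some a, some b =>
               PySem.List.slice s none (some a) ++ (PySem.List.slice s (some a) (some (b+1))).reverse
                 ++ PySem.List.slice s (some (b+1)) none
             | _, _ => s) from rfl, hx, hy]
      exact (rev_perm s a b ha0 hab).trans hperm
  next x y =>
    simp only [pvPreRule, Bool.and_eq_true] at hok
    obtain ⟨hxok, hyok⟩ := hok
    rcases hxv : PySem.Int.ofStr? x with - | xv <;> rw [hxv] at hxok
    · simp at hxok
    rcases hy : PySem.Int.ofStr? y with - | yv <;> rw [hy] at hyok
    · simp at hyok
    simp only [Bool.and_eq_true, decide_eq_true_eq] at hyok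
    obtain ⟨hy1, hy2⟩ := hyok
    rw [← hlen] at hy1 hy2
    have hplt : (PySem.Int.mod yv s.length).toNat < s.length := mod_idx_lt _ _ hy1 hy2
    constructor
    · show (match some xv, some yv with
        | some xv, some yv =>
          match PySem.List.pop? s yv with
          | some cr => PySem.List.insert cr.2 xv cr.1
          | none => s
        | _, _ => s) = _
      rw [show altUndo ["move", "position", x, "to", "position", y] s
          = (match PySem.Int.ofStr? x, PySem.Int.ofStr? y with
             | some q, some p =>
               match PySem.List.pop? s p with
               | some cr => PySem.List.insert cr.2 q cr.1
               | none => s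
             | _, _ => s) from rfl, hxv, hy]
    · show (pvApply s ["move", "position", x, "to", "position", y]).Perm chars
      rw [show pvApply s ["move", "position", x, "to", "position", y]
          = (match PySem.Int.ofStr? x, PySem.Int.ofStr? y with
             | some xv, some yv =>
               match PySem.List.pop? s yv with
               | some cr => PySem.List.insert cr.2 xv cr.1
               | none => s
             | _, _ => s) from rfl, hxv, hy]
      show (match PySem.List.pop? s yv with
        | some cr => PySem.List.insert cr.2 xv cr.1
        | none => s).Perm chars
      rw [pop_norm s yv hy1 hy2]
      show (PySem.List.insert (s.eraseIdx (PySem.Int.mod yv s.length).toNat) xv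
        (s[(PySem.Int.mod yv s.length).toNat]'hplt)).Perm chars
      refine ((insert_perm _ xv _).trans ?_).trans hperm
      rw [List.eraseIdx_eq_take_drop_succ]
      have hsplit : s.take (PySem.Int.mod yv s.length).toNat
          ++ s[(PySem.Int.mod yv s.length).toNat]'hplt :: s.drop ((PySem.Int.mod yv s.length).toNat + 1) = s := by
        rw [← List.drop_eq_getElem_cons hplt, List.take_append_drop]
      have := (List.perm_middle (a := s[(PySem.Int.mod yv s.length).toNat]'hplt)
        (l₁ := s.take (PySem.Int.mod yv s.length).toNat)
        (l₂ := s.drop ((PySem.Int.mod yv s.length).toNat + 1)))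
      rw [hsplit] at this
      exact this.symm
  next c =>
    simp only [pvPreRule, Bool.and_eq_true] at hok
    obtain ⟨⟨hcs, hnd⟩, hsurj⟩ := hok
    rcases hc : c.toList with - | ⟨ch, crest⟩ <;> rw [hc] at hcs
    · simp at hcs
    rcases crest with - | ⟨c2, crest⟩
    swap
    · simp at hcs
    have hch : ch ∈ chars := by
      have h' : chars.contains ch = true := hcs
      simpa using h'
    have hnds : s.Nodup := hperm.nodup_iff.mpr (of_decide_eq_true hnd)
    have hmem : ch ∈ s := hperm.mem_iff.mpr hch
    obtain ⟨i, hi⟩ := Option.isSome_iff_exists.mp ((PySem.List.index?_isSome_iff s ch).2 hmem)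
    simp only [List.all_eq_true, List.any_eq_true, List.mem_range, beq_iff_eq] at hsurj
    have hsurj' : ∀ i' < s.length, ∃ j, j < s.length ∧
        (j + (j + 1 + (if 4 ≤ j then 1 else 0))) % s.length = i' := by
      rw [hlen]
      intro i' hi'
      obtain ⟨j, hj1, hj2⟩ := hsurj i' hi'
      exact ⟨j, hj1, hj2⟩
    have hAI : altIndex s c = some i := by simp only [altIndex, hc]; exact hi
    have hEq := based_eq s c ch i hc hnds hi hsurj'
    constructor
    · show pvSearch c s (s.length + 1) s = _
      rw [show altUndo ["rotate", "based", "on", "position", "of", "letter", c] s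
          = (match altIndex s c with
             | some i => altLoop s (i : Int) (s.length : Int) (PySem.List.pyRange 0 (s.length : Int) 1)
             | none => s) from rfl, hAI]
      exact hEq
    · show (pvApply s ["rotate", "based", "on", "position", "of", "letter", c]).Perm chars
      rw [show pvApply s ["rotate", "based", "on", "position", "of", "letter", c]
          = pvSearch c s (s.length + 1) s from rfl, hEq]
      exact (altLoop_perm s (i : Int) (s.length : Int) _).trans hperm
  next h1 h2 h3 h4 h5 h6 h7 =>
    refine ⟨?_, ?_⟩
    · rw [altUndo_none tok h1 h2 h3 h4 h5 h6 h7 (s := s)]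
    · rw [apply_none tok s h1 h2 h3 h4 h5 h6 h7]
      exact hperm

theorem fold_eq (chars : List Char) : ∀ (rs : List String) (s : List Char),
    s.Perm chars → (∀ r ∈ rs, pvPreRule chars ((PySem.Str.split? r " ").getD []) = true) →
    rs.foldl pvStep s = rs.foldl altStep s ∧ (rs.foldl pvStep s).Perm chars := by
  intro rs
  induction rs with
  | nil => exact fun s hperm _ => ⟨rfl, hperm⟩
  | cons r rs ih =>
    intro s hperm hok
    obtain ⟨heq, hperm'⟩ := apply_eq chars s ((PySem.Str.split? r " ").getD []) hperm
      (hok r (List.mem_cons_self))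
    obtain ⟨heq2, hperm2⟩ := ih (pvStep s r) hperm'
      (fun u hu => hok u (List.mem_cons_of_mem r hu))
    refine ⟨?_, hperm2⟩
    simp only [List.foldl_cons]
    rw [heq2]
    show List.foldl altStep (pvStep s r) rs = _
    rw [show pvStep s r = altStep s r from heq]

-- ===== VERDICT (by name: the statement is the Claim_ definition above) =====
theorem unscramble_spec : Claim_equal_unscramble := by
  intro rules password _hdom hpre
  show unscramble rules password = unscramble_alt rules password
  unfold unscramble unscramble_alt
  have hfold := fold_eq password.toList rules.reverse password.toList (List.Perm.refl _)
    (by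
      intro r hr
      exact hpre r (List.mem_reverse.mp hr))
  rw [hfold.1]
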